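-- pv_equiv track=rewrite | github.com/emesix/switchcraft | src/mcp_network_switch/devices/brocade.py | _format_port_range
-- ===== SOURCE A (Python) =====
-- def _format_port_range(ports: list[str]) -> str:
--     """Format ports for Brocade command.
--
--     Input: ["1/1/1", "1/1/2", "1/1/3", "1/1/4"]
--     Output: "1/1/1 to 1/1/4" (if contiguous)
--
--     Input: ["1/1/1", "1/1/3", "1/1/5"]
--     Output: "1/1/1 to 1/1/1 1/1/3 to 1/1/3 1/1/5 to 1/1/5" (individual)
--
--     Brocade requires "ethe X/Y/Z to X/Y/W" syntax for port ranges.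
--     """
--     if not ports:
--         return ""
--
--     # Parse ports into (unit, module, port) tuples
--     parsed = []
--     for p in ports:
--         try:
--             parts = p.split("/")
--             if len(parts) == 3:
--                 parsed.append((int(parts[0]), int(parts[1]), int(parts[2]), p))
--         except (ValueError, IndexError):
--             # Keep original string for non-standard formats
--             parsed.append((0, 0, 0, p))
--
--     # Sort by unit, module, port
--     parsed.sort(key=lambda x: (x[0], x[1], x[2]))
--
--     # Group contiguous ranges within same unit/module
--     ranges = []
--     i = 0
--     while i < len(parsed):
--         unit, module, port_num, port_str = parsed[i]
--         start = port_str
--         end = port_str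
--
--         # Find contiguous ports in same unit/module
--         j = i + 1
--         while j < len(parsed):
--             next_unit, next_module, next_port, next_str = parsed[j]
--             prev_unit, prev_module, prev_port, _ = parsed[j - 1]
--
--             if (next_unit == prev_unit and
--                 next_module == prev_module and
--                 next_port == prev_port + 1):
--                 end = next_str
--                 j += 1
--             else:
--                 break
--
--         ranges.append(f"{start} to {end}")
--         i = j
--
--     return " ".join(ranges)
-- ===== SOURCE B (Python) =====
-- def _format_port_range(ports: list[str]) -> str:
--     """Gaps-and-islands: tag each sorted parsed port with the run-invariant key
--     (unit, module, port - position); maximal contiguous ranges are exactly the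
--     maximal blocks of equal adjacent keys, formatted as first/last of the block."""
--     parsed = []
--     for p in ports:
--         try:
--             parts = p.split("/")
--             if len(parts) == 3:
--                 parsed.append((int(parts[0]), int(parts[1]), int(parts[2]), p))
--         except (ValueError, IndexError):
--             parsed.append((0, 0, 0, p))
--     parsed.sort(key=lambda x: (x[0], x[1], x[2]))
--     keyed = [((u, m, q - i), s) for i, (u, m, q, s) in enumerate(parsed)]
--     runs = []
--     for k, s in keyed:
--         if runs and runs[-1][0] == k:
--             runs[-1][1].append(s)
--         else:
--             runs.append((k, [s]))
--     return " ".join(f"{ss[0]} to {ss[-1]}" for _, ss in runs)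
-- ===== Notes on version B (the rewrite author's own statement) =====
-- stated objective: alternative
-- what changed: Replaces A's nested index-jumping run scan (inner while comparing each element with its predecessor's unit/module/port+1) by the gaps-and-islands technique: each sorted parsed port is tagged with the run-invariant key (unit, module, port - position), and maximal contiguous ranges become maximal blocks of equal adjacent keys, grouped by a generic equal-key fold and formatted as first/last of each block.
import Mathlib
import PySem

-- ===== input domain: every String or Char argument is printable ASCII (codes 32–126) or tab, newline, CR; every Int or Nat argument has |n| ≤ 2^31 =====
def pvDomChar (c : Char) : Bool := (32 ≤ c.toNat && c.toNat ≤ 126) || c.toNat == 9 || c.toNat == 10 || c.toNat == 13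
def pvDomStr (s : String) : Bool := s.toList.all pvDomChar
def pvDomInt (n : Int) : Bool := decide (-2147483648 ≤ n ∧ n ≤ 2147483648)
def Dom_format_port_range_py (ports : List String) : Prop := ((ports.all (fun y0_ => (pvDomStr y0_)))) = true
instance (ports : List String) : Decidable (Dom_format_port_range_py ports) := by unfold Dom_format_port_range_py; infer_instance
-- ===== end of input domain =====

-- B replaces A's nested index-jumping run scan by the gaps-and-islands technique: each sorted
-- element is tagged with the run-invariant key (unit, module, port - position) and maximal
-- contiguous ranges are the maximal blocks of equal adjacent keys (objective: alternative, same cost).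


-- Shared A/B vocabulary (both Python sources contain this code verbatim): a parsed entry
-- (unit, module, port, original string), the stable sort by the int triple, the f-string
-- "start to end".
abbrev PvEntry : Type := Int × Int × Int × String

-- parsed.append inside the for-loop (try/except: a non-int field in a 3-part split → (0,0,0,p);
-- a split whose length is not 3 appends nothing)
def pvParse (ports : List String) : List PvEntry :=
  ports.foldl (fun parsed p =>
    match (PySem.Str.split? p "/").getD [] with
    | [s0, s1, s2] =>
      match PySem.Int.ofStr? s0, PySem.Int.ofStr? s1, PySem.Int.ofStr? s2 with
      | some u, some m, some q => parsed ++ [(u, m, q, p)]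
      | _, _, _ => parsed ++ [(0, 0, 0, p)]
    | _ => parsed) []

def pvSortParsed (xs : List PvEntry) : List PvEntry :=
  PySem.List.sorted2 xs (fun x => x.1) (fun x => (toLex (x.2.1, x.2.2.1) : Int ×ₗ Int))

def pvFmt (s e : String) : String := PySem.Str.join " to " [s, e]

-- ===== PORT A =====
-- the inner while: scan forward while unit/module match and port = prev port + 1;
-- returns (end, remaining suffix = parsed[j:])
def pvRunA (prev : PvEntry) : List PvEntry → String × List PvEntry
  | [] => (prev.2.2.2, [])
  | x :: rest =>
    if x.1 == prev.1 && x.2.1 == prev.2.1 && x.2.2.1 == prev.2.2.1 + 1 then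
      pvRunA x rest
    else (prev.2.2.2, x :: rest)

theorem pvRunA_snd_length (prev : PvEntry) (xs : List PvEntry) :
    (pvRunA prev xs).2.length ≤ xs.length := by
  induction xs generalizing prev with
  | nil => simp [pvRunA]
  | cons x rest ih =>
    simp only [pvRunA]
    split
    · exact le_trans (ih x) (Nat.le_succ _)
    · simp

-- the outer while over i, jumping i := j
def pvGroupsA : List PvEntry → List String
  | [] => []
  | x :: rest =>
    let r := pvRunA x rest
    pvFmt x.2.2.2 r.1 :: pvGroupsA r.2
termination_by xs => xs.length
decreasing_by
  have := pvRunA_snd_length x rest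
  simpa using Nat.lt_succ_of_le this

def format_port_range_py (ports : List String) : String :=
  if ports = [] then ""
  else PySem.Str.join " " (pvGroupsA (pvSortParsed (pvParse ports)))

-- ===== PORT B =====
abbrev PvKey : Type := Int × Int × Int

-- keyed = [((u, m, q - i), s) for i, (u, m, q, s) in enumerate(parsed)]
def pvKeyed (parsed : List PvEntry) : List (PvKey × String) :=
  (PySem.List.enumerate parsed).map
    (fun iu => ((iu.2.1, iu.2.2.1, iu.2.2.2.1 - iu.1), iu.2.2.2.2))

-- the B for-loop body: extend the last run if its key equals the current key, else open a run
def pvRunStep (runs : List (PvKey × List String)) (ks : PvKey × String) :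
    List (PvKey × List String) :=
  match runs.getLast? with
  | some last =>
      if last.1 == ks.1 then runs.dropLast ++ [(last.1, last.2 ++ [ks.2])]
      else runs ++ [(ks.1, [ks.2])]
  | none => runs ++ [(ks.1, [ks.2])]

-- ss[0] / ss[-1]: every run list is nonempty by construction, so headD/getLastD are exact
def format_port_range_py_alt (ports : List String) : String :=
  PySem.Str.join " "
    (((pvKeyed (pvSortParsed (pvParse ports))).foldl pvRunStep []).map
      (fun r => pvFmt (r.2.headD "") (r.2.getLastD "")))

-- ===== PRECONDITION & SPEC =====
def Spec_format_port_range_py (ports : List String) (out : String) : Prop := out = format_port_range_py_alt ports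
instance (ports : List String) (out : String) : Decidable (Spec_format_port_range_py ports out) := by unfold Spec_format_port_range_py; infer_instance

-- ===== CLAIM (what is proved, stated in full; the proofs are below) =====
def Claim_equal_format_port_range_py : Prop := ∀ (ports : List String), Dom_format_port_range_py ports → Spec_format_port_range_py ports (format_port_range_py ports)

-- ===== LEMMAS AND PROOFS =====

theorem pvGroupsA_nil : pvGroupsA [] = [] := by
  rw [pvGroupsA.eq_def]

theorem pvGroupsA_cons (x : PvEntry) (rest : List PvEntry) :
    pvGroupsA (x :: rest) =
      pvFmt x.2.2.2 (pvRunA x rest).1 :: pvGroupsA (pvRunA x rest).2 := by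
  rw [pvGroupsA.eq_def]

-- recursive characterisation of B's foldl: consume the current run (key k, strings ss), then
-- start a fresh run on the first key change
def pvConsume (k : PvKey) (ss : List String) : List (PvKey × String) → List (PvKey × List String)
  | [] => [(k, ss)]
  | x :: t => if k == x.1 then pvConsume k (ss ++ [x.2]) t else (k, ss) :: pvConsume x.1 [x.2] t

theorem foldl_runStep (l : List (PvKey × String)) :
    ∀ (runs : List (PvKey × List String)) (k : PvKey) (ss : List String),
    l.foldl pvRunStep (runs ++ [(k, ss)]) = runs ++ pvConsume k ss l := by
  induction l with
  | nil => intro runs k ss; simp [pvConsume]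
  | cons x t ih =>
    intro runs k ss
    simp only [List.foldl_cons, pvRunStep, List.getLast?_concat, List.dropLast_concat, pvConsume]
    by_cases h : k == x.1
    · rw [if_pos h, if_pos h, ih]
    · rw [if_neg h, if_neg h, ih (runs ++ [(k, ss)]) x.1 [x.2]]
      simp

-- pvKeyed with an explicit running index
def pvKeyedFrom (n : Int) : List PvEntry → List (PvKey × String)
  | [] => []
  | x :: t => ((x.1, x.2.1, x.2.2.1 - n), x.2.2.2) :: pvKeyedFrom (n + 1) t

theorem enumerate_map_key (parsed : List PvEntry) :
    ∀ n : Int,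
    (PySem.List.enumerate parsed n).map
      (fun iu => ((iu.2.1, iu.2.2.1, iu.2.2.2.1 - iu.1), iu.2.2.2.2)) = pvKeyedFrom n parsed := by
  induction parsed with
  | nil => intro n; simp [pvKeyedFrom, PySem.List.enumerate_nil]
  | cons x t ih => intro n; simp [pvKeyedFrom, PySem.List.enumerate_cons, ih]

-- adjacent keys are equal exactly when A's successor condition holds, so pvConsume over the
-- keyed tail produces A's run followed by A's groups of the remainder
theorem consume_keyed (t : List PvEntry) :
    ∀ (n : Int) (x : PvEntry) (ss : List String), ss ≠ [] → ss.getLast? = some x.2.2.2 →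
    (pvConsume (x.1, x.2.1, x.2.2.1 - n) ss (pvKeyedFrom (n + 1) t)).map
        (fun r => pvFmt (r.2.headD "") (r.2.getLastD "")) =
      pvFmt (ss.headD "") (pvRunA x t).1 :: pvGroupsA (pvRunA x t).2 := by
  induction t with
  | nil =>
    intro n x ss hne hlast
    simp only [pvKeyedFrom, pvConsume, pvRunA, List.map_cons, List.map_nil, pvGroupsA_nil]
    rw [List.getLastD_eq_getLast?, hlast]
    rfl
  | cons y t ih =>
    intro n x ss hne hlast
    obtain ⟨a, ss', rfl⟩ := List.exists_cons_of_ne_nil hne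
    by_cases hc : y.1 = x.1 ∧ y.2.1 = x.2.1 ∧ y.2.2.1 = x.2.2.1 + 1
    · obtain ⟨h1, h2, h3⟩ := hc
      have hkey : ((x.1, x.2.1, x.2.2.1 - n) == (y.1, y.2.1, y.2.2.1 - (n + 1))) = true := by
        simp [h1, h2, h3]
      have hA : (y.1 == x.1 && y.2.1 == x.2.1 && y.2.2.1 == x.2.2.1 + 1) = true := by
        simp [h1, h2, h3]
      simp only [pvKeyedFrom, pvConsume, if_pos hkey, pvRunA, hA]
      have hk2 : ((x.1, x.2.1, x.2.2.1 - n) : PvKey) = (y.1, y.2.1, y.2.2.1 - (n + 1)) := by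
        simpa using hkey
      rw [hk2]
      have hlast2 : ((a :: ss') ++ [y.2.2.2]).getLast? = some y.2.2.2 :=
        List.getLast?_concat
      have := ih (n + 1) y ((a :: ss') ++ [y.2.2.2]) (by simp) hlast2
      simpa using this
    · have hkey : ¬ (((x.1, x.2.1, x.2.2.1 - n) : PvKey) == (y.1, y.2.1, y.2.2.1 - (n + 1))) = true := by
        simp only [beq_iff_eq, Prod.mk.injEq]
        intro h
        exact hc ⟨h.1.symm, h.2.1.symm, by omega⟩
      have hA : (y.1 == x.1 && y.2.1 == x.2.1 && y.2.2.1 == x.2.2.1 + 1) = false := by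
        rcases not_and_or.mp hc with h | h
        · simp [h]
        rcases not_and_or.mp h with h' | h'
        · simp [h']
        · simp [h']
      simp only [pvKeyedFrom, pvConsume, if_neg hkey, pvRunA, hA, Bool.false_eq_true,
        if_false, List.map_cons]
      have hrec := ih (n + 1) y [y.2.2.2] (by simp) (by simp)
      rw [hrec, pvGroupsA_cons]
      rw [List.getLastD_eq_getLast?, hlast]
      rfl

-- B's grouped-and-formatted runs are exactly A's groups
theorem runs_eq_groups (parsed : List PvEntry) :
    ((pvKeyed parsed).foldl pvRunStep []).map
        (fun r => pvFmt (r.2.headD "") (r.2.getLastD "")) = pvGroupsA parsed := by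
  cases parsed with
  | nil => simp [pvKeyed, PySem.List.enumerate_nil, pvGroupsA_nil]
  | cons x rest =>
    unfold pvKeyed
    rw [enumerate_map_key (x :: rest) 0]
    show ((pvKeyedFrom 0 (x :: rest)).foldl pvRunStep []).map _ = _
    rw [pvKeyedFrom]
    rw [List.foldl_cons]
    have hfirst : pvRunStep [] ((x.1, x.2.1, x.2.2.1 - 0), x.2.2.2)
        = [] ++ [(((x.1, x.2.1, x.2.2.1 - 0) : PvKey), [x.2.2.2])] := by
      simp [pvRunStep]
    rw [hfirst, foldl_runStep]
    rw [List.nil_append]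
    rw [consume_keyed rest 0 x [x.2.2.2] (by simp) (by simp)]
    rw [pvGroupsA_cons]
    simp

-- ===== VERDICT (by name: the statement is the Claim_ definition above) =====
theorem format_port_range_py_spec : Claim_equal_format_port_range_py := by
  intro ports _
  unfold Spec_format_port_range_py format_port_range_py format_port_range_py_alt
  rw [runs_eq_groups]
  by_cases hp : ports = []
  · subst hp
    have h2 : pvSortParsed [] = [] :=
      (PySem.List.sorted2_perm (xs := ([] : List PvEntry)) (k1 := fun x => x.1)
        (k2 := fun x => (toLex (x.2.1, x.2.2.1) : Int ×ₗ Int)) false).eq_nil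
    rw [if_pos rfl, show pvParse ([] : List String) = [] from rfl, h2, pvGroupsA_nil]
    rfl
  · rw [if_neg hp]
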